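-- pv_equiv track=rewrite | github.com/QuantSysBio/inSPIRE | inspire/utils.py | convert_mod_seq_to_ptm_seq
-- ===== SOURCE A (Python) =====
-- def convert_mod_seq_to_ptm_seq(mod_seq):
--     """ Function to convert the modified prosit sequence to the PTM seq used elsewhere.
--
--     Parameters
--     ----------
--     mod_seq : str
--         The input sequence for Prosit.
--
--     Returns
--     -------
--     ptm_seq : str
--         The string of digits used to represent any PTMs present.
--     """
--     ptm_seq = '0.'
--     while mod_seq:
--         if len(mod_seq) == 1 or mod_seq[1] != '[':
--             ptm_seq += '0'
--             mod_seq = mod_seq[1:]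
--         elif mod_seq[1] == '[' and mod_seq[0] == 'C':
--             ptm_seq += '2'
--             mod_seq = mod_seq[8:]
--         else:
--             ptm_seq += '1'
--             mod_seq = mod_seq[8:]
--
--     ptm_seq += '.0'
--     return ptm_seq
-- ===== SOURCE B (Python) =====
-- def convert_mod_seq_to_ptm_seq(mod_seq):
--     """Single pass with an index pointer; no repeated string slicing."""
--     n = len(mod_seq)
--     out = ['0.']
--     i = 0
--     while i < n:
--         if i + 1 < n and mod_seq[i + 1] == '[':
--             out.append('2' if mod_seq[i] == 'C' else '1')
--             i += 8
--         else:
--             out.append('0')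
--             i += 1
--     out.append('.0')
--     return ''.join(out)
-- ===== Notes on version B (the rewrite author's own statement) =====
-- stated objective: faster
-- what changed: Replaces the loop that re-slices the remaining string on every step (mod_seq = mod_seq[1:]/[8:]) with a single pass advancing an index pointer and joining collected pieces once.
import Mathlib
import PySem

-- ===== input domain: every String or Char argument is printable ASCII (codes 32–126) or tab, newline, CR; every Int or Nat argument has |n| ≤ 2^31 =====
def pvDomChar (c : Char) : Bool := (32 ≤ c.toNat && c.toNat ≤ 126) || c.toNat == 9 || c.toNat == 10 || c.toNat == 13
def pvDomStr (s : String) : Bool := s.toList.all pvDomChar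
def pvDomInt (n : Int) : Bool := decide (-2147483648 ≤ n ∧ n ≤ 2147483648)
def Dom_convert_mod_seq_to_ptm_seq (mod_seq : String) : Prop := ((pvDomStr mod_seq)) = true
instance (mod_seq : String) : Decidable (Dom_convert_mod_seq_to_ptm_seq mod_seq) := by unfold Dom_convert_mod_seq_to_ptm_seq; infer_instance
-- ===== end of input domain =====

-- B replaces A's quadratic loop of repeated string slicing by a single pass with an index pointer (faster: asymptotic).


-- ===== PORT A =====
-- A's while loop: each iteration inspects the head of the remaining string and
-- replaces it by its slice [1:] or [8:] (PySem.List.slice on positive bounds = List.drop).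
def aLoop (l : List Char) : List Char :=
  if _h : l ≠ [] then
    if l.length = 1 ∨ l[1]? ≠ some '[' then
      '0' :: aLoop (l.drop 1)
    else if l[1]? = some '[' ∧ l[0]? = some 'C' then
      '2' :: aLoop (l.drop 8)
    else
      '1' :: aLoop (l.drop 8)
  else []
termination_by l.length
decreasing_by
  all_goals cases l <;> simp_all <;> omega

def convert_mod_seq_to_ptm_seq (mod_seq : String) : String :=
  String.mk ('0' :: '.' :: aLoop mod_seq.toList ++ ['.', '0'])

-- ===== PORT B =====
-- B's while loop: the string is fixed, an index pointer i advances by 1 or 8.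
def bLoop (s : List Char) (n i : Nat) : List Char :=
  if _h : i < n then
    if i + 1 < n ∧ s[i+1]? = some '[' then
      (if s[i]? = some 'C' then '2' else '1') :: bLoop s n (i + 8)
    else
      '0' :: bLoop s n (i + 1)
  else []
termination_by n - i

def convert_mod_seq_to_ptm_seq_alt (mod_seq : String) : String :=
  let s := mod_seq.toList
  String.mk ('0' :: '.' :: bLoop s s.length 0 ++ ['.', '0'])

-- ===== PRECONDITION & SPEC =====
def Spec_convert_mod_seq_to_ptm_seq (mod_seq : String) (out : String) : Prop := out = convert_mod_seq_to_ptm_seq_alt mod_seq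
instance (mod_seq : String) (out : String) : Decidable (Spec_convert_mod_seq_to_ptm_seq mod_seq out) := by unfold Spec_convert_mod_seq_to_ptm_seq; infer_instance

-- ===== CLAIM (what is proved, stated in full; the proofs are below) =====
def Claim_equal_convert_mod_seq_to_ptm_seq : Prop := ∀ (mod_seq : String), Dom_convert_mod_seq_to_ptm_seq mod_seq → Spec_convert_mod_seq_to_ptm_seq mod_seq (convert_mod_seq_to_ptm_seq mod_seq)

-- ===== LEMMAS AND PROOFS =====

-- On the suffix starting at i, A's loop computes exactly what B's index loop computes.
lemma aLoop_eq_bLoop (s : List Char) :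
    ∀ k i, s.length - i ≤ k → aLoop (s.drop i) = bLoop s s.length i := by
  intro k
  induction k with
  | zero =>
      intro i hi
      have h : s.length ≤ i := by omega
      rw [List.drop_eq_nil_of_le h]
      rw [aLoop, bLoop]
      simp [Nat.not_lt.mpr h]
  | succ k ih =>
      intro i hi
      by_cases hlt : i < s.length
      · have hne : s.drop i ≠ [] := by
          simp [List.drop_eq_nil_iff]; omega
        have hlen : (s.drop i).length = s.length - i := by simp
        have hget1 : (s.drop i)[1]? = s[i+1]? := by
          rw [List.getElem?_drop]
        have hget0 : (s.drop i)[0]? = s[i]? := by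
          simp [List.getElem?_drop]
        rw [aLoop, bLoop, dif_pos hne, dif_pos hlt]
        simp only [hlen, hget0, hget1, List.drop_drop]
        by_cases hc : i + 1 < s.length ∧ s[i+1]? = some '['
        · -- A takes a 'bracket' branch, B the same
          have hA : ¬ (s.length - i = 1 ∨ s[i+1]? ≠ some '[') := by
            push_neg; exact ⟨by omega, hc.2⟩
          rw [if_neg hA, if_pos hc]
          have hrec : aLoop (s.drop (i + 8)) = bLoop s s.length (i + 8) :=
            ih (i + 8) (by omega)
          by_cases h0 : s[i]? = some 'C'
          · rw [if_pos ⟨hc.2, h0⟩, if_pos h0, hrec]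
          · rw [if_neg (by simp [h0]), if_neg h0, hrec]
        · -- both take the step-by-one branch
          have hA : s.length - i = 1 ∨ s[i+1]? ≠ some '[' := by
            rcases Nat.lt_or_ge (i+1) s.length with h1 | h1
            · right; intro hb; exact hc ⟨h1, hb⟩
            · left; omega
          rw [if_pos hA, if_neg hc]
          have hrec : aLoop (s.drop (i + 1)) = bLoop s s.length (i + 1) :=
            ih (i + 1) (by omega)
          rw [hrec]
      · have h : s.length ≤ i := by omega
        rw [List.drop_eq_nil_of_le h]
        rw [aLoop, bLoop]
        simp [Nat.not_lt.mpr h]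

-- ===== VERDICT (by name: the statement is the Claim_ definition above) =====
theorem convert_mod_seq_to_ptm_seq_spec : Claim_equal_convert_mod_seq_to_ptm_seq := by
  intro mod_seq _
  unfold Spec_convert_mod_seq_to_ptm_seq convert_mod_seq_to_ptm_seq convert_mod_seq_to_ptm_seq_alt
  have h := aLoop_eq_bLoop mod_seq.toList mod_seq.toList.length 0 (by omega)
  rw [List.drop_zero] at h
  show String.mk ('0' :: '.' :: aLoop mod_seq.toList ++ ['.', '0'])
      = String.mk ('0' :: '.' :: bLoop mod_seq.toList mod_seq.toList.length 0 ++ ['.', '0'])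
  rw [h]
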